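-- pv_equiv track=rewrite | github.com/RavenInDisguise/Python-Programs | Prácticas recursividad/Práctica #1 Oficial/funcionesRecPila.py | formarParesRec
-- ===== SOURCE A (Python) =====
-- def esPar(numero):
--     """
--     Funcionalidad: Validar si un número es par.
--     Entradas: El número.
--     Salidas: True (sí es par) o False (no es par).
--     """
--     if numero%2==0:
--         return True
--     else:
--         return False
--
-- def formarParesRec(num):
--     """
--     Funcionalidad: Formar un número con los dígitos pares de otro.
--     Entradas: El número.
--     Salidas: El número nuevo.
--     """
--     if num==0:
--         return 0
--     else:
--         if esPar(num%10):
--             return (10*formarParesRec(num//10))+num%10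
--         else:
--             return formarParesRec(num//10)
-- ===== SOURCE B (Python) =====
-- def formarParesRec(num):
--     """Two staged passes: collect the even digits (low-to-high) into a list,
--     then fold the reversed list into a number with result = result*10 + d."""
--     digits = []
--     while num != 0:
--         d = num % 10
--         if d % 2 == 0:
--             digits.append(d)
--         num //= 10
--     result = 0
--     for d in reversed(digits):
--         result = result * 10 + d
--     return result
-- ===== Notes on version B (the rewrite author's own statement) =====
-- stated objective: alternative
-- what changed: Replaces the recursive digit-folding with two staged passes: first collect the even digits into a list, then fold the reversed list into the result with result*10+d.
import Mathlib
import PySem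

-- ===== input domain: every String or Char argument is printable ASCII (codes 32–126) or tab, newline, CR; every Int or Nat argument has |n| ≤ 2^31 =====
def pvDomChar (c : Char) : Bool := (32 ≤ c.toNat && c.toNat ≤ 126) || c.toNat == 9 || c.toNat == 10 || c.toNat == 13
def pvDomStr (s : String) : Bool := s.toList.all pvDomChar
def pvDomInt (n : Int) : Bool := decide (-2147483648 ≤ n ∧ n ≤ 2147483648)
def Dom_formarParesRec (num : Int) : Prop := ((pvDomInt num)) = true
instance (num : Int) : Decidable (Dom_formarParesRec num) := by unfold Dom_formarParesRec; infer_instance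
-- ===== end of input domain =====

-- B rewrites the recursive even-digit folding as two staged passes (collect even digits
-- into a list, then fold the reversed list); Pre_ excludes negatives, where Python A recurses forever.


-- ===== PORT A =====
-- A's recursion on the digits; for num ≥ 0 Python's %10 and //10 coincide with Nat.mod/div,
-- so the recursion is carried out on num.toNat (negatives lie outside Pre_: Python diverges there).
def formarParesRecGoA (n : Nat) : Int :=
  if n = 0 then 0
  else
    if n % 10 % 2 = 0 then 10 * formarParesRecGoA (n / 10) + (n % 10 : Nat)
    else formarParesRecGoA (n / 10)
decreasing_by all_goals exact Nat.div_lt_self (Nat.pos_of_ne_zero (by assumption)) (by norm_num)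

def formarParesRec (num : Int) : Int := formarParesRecGoA num.toNat

-- ===== PORT B =====
-- Pass 1 of B: the while loop appending the even digits, low-to-high.
def collectEvenDigits (n : Nat) (digits : List Int) : List Int :=
  if n = 0 then digits
  else
    let d := n % 10
    collectEvenDigits (n / 10) (if d % 2 = 0 then digits ++ [(d : Int)] else digits)
decreasing_by all_goals exact Nat.div_lt_self (Nat.pos_of_ne_zero (by assumption)) (by norm_num)

-- Pass 2 of B: 'for d in reversed(digits): result = result*10 + d'.
def formarParesRec_alt (num : Int) : Int :=
  ((collectEvenDigits num.toNat []).reverse).foldl (fun result d => result * 10 + d) 0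

-- ===== PRECONDITION & SPEC =====
-- Pre_ excludes negative num: there Python A (and B) never terminate (num//10 stalls at -1).
def Pre_formarParesRec (num : Int) : Prop := 0 ≤ num
instance (num : Int) : Decidable (Pre_formarParesRec num) := by unfold Pre_formarParesRec; infer_instance
def pvWitness_formarParesRec : Int := (2048)
def Spec_formarParesRec (num : Int) (out : Int) : Prop := out = formarParesRec_alt num
instance (num : Int) (out : Int) : Decidable (Spec_formarParesRec num out) := by unfold Spec_formarParesRec; infer_instance

-- ===== CLAIM =====
def Claim_equal_formarParesRec : Prop := ∀ (num : Int), Dom_formarParesRec num → Pre_formarParesRec num → Spec_formarParesRec num (formarParesRec num)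

-- ===== LEMMAS AND PROOFS =====
-- The cons-form list of even digits, low-to-high.
def evenDigits (n : Nat) : List Int :=
  if n = 0 then []
  else if n % 10 % 2 = 0 then ((n % 10 : Nat) : Int) :: evenDigits (n / 10) else evenDigits (n / 10)
decreasing_by all_goals exact Nat.div_lt_self (Nat.pos_of_ne_zero (by assumption)) (by norm_num)

theorem collectEvenDigits_eq (n : Nat) : ∀ acc, collectEvenDigits n acc = acc ++ evenDigits n := by
  induction n using Nat.strong_induction_on with
  | _ n ih =>
    intro acc
    by_cases h : n = 0
    · subst h; simp [collectEvenDigits, evenDigits]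
    · have hlt : n / 10 < n := Nat.div_lt_self (Nat.pos_of_ne_zero h) (by norm_num)
      rw [collectEvenDigits, evenDigits]
      simp only [h, if_false]
      by_cases hp : n % 10 % 2 = 0
      · simp only [hp, if_true, ih _ hlt, List.append_assoc, List.singleton_append]
      · simp only [hp, if_false, ih _ hlt]

theorem formarParesRecGoA_eq (n : Nat) :
    formarParesRecGoA n = (evenDigits n).foldr (fun d r => r * 10 + (d : Int)) 0 := by
  induction n using Nat.strong_induction_on with
  | _ n ih =>
    by_cases h : n = 0
    · subst h; simp [formarParesRecGoA, evenDigits]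
    · have hlt : n / 10 < n := Nat.div_lt_self (Nat.pos_of_ne_zero h) (by norm_num)
      rw [formarParesRecGoA, evenDigits]
      simp only [h, if_false]
      by_cases hp : n % 10 % 2 = 0
      · simp only [hp, if_true, List.foldr_cons, ih _ hlt]; ring
      · simp only [hp, if_false]; exact ih _ hlt

-- ===== VERDICT =====
theorem formarParesRec_spec : Claim_equal_formarParesRec := by
  intro num _ _
  unfold Spec_formarParesRec formarParesRec formarParesRec_alt
  rw [collectEvenDigits_eq, List.nil_append, List.foldl_reverse, formarParesRecGoA_eq]
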